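-- pv_equiv track=rewrite | github.com/jvdhorn/AoC2019 | 22/solution.py | get_new_position
-- ===== SOURCE A (Python) =====
-- def get_new_position(instructions, position):
--
--   for inst, val in instructions:
--     if inst == 0:
--       position = - position - 1
--     if inst == 1:
--       position = position - val
--     if inst == 2:
--       position = position * val
--
--   return position
-- ===== SOURCE B (Python) =====
-- def get_new_position(instructions, position):
--   a, b = 1, 0
--   for inst, val in instructions:
--     if inst == 0:
--       a, b = -a, -b - 1
--     elif inst == 1:
--       b = b - val
--     elif inst == 2:
--       a, b = a * val, b * val
--   return a * position + b
-- ===== Notes on version B (the rewrite author's own statement) =====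
-- stated objective: alternative
-- what changed: B folds all instructions into one composite affine map (coefficients a,b) and applies it to the position once, instead of updating the position itself at each step.
import Mathlib
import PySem

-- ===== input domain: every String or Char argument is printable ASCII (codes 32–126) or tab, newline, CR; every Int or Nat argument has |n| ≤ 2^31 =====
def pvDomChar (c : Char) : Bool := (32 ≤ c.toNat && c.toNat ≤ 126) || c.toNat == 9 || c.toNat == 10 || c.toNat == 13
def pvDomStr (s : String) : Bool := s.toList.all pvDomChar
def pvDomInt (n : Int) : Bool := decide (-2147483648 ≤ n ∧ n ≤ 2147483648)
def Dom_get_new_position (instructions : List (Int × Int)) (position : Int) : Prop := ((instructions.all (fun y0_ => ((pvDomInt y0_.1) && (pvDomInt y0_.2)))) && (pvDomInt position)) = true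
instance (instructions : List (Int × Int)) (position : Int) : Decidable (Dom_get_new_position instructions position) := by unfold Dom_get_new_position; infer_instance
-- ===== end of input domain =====

-- ===== PORT A =====
-- One honest line: B maintains composite affine coefficients (a, b) over the instructions
-- and applies a*position + b once at the end, instead of updating position per step.
def get_new_position (instructions : List (Int × Int)) (position : Int) : Int :=
  instructions.foldl
    (fun position iv =>
      let position := if iv.1 == 0 then - position - 1 else position
      let position := if iv.1 == 1 then position - iv.2 else position
      let position := if iv.1 == 2 then position * iv.2 else position
      position)
    position

-- ===== PORT B =====
def get_new_position_alt (instructions : List (Int × Int)) (position : Int) : Int :=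
  let ab := instructions.foldl
    (fun ab iv =>
      if iv.1 == 0 then (-ab.1, -ab.2 - 1)
      else if iv.1 == 1 then (ab.1, ab.2 - iv.2)
      else if iv.1 == 2 then (ab.1 * iv.2, ab.2 * iv.2)
      else ab)
    ((1 : Int), (0 : Int))
  ab.1 * position + ab.2

-- ===== PRECONDITION & SPEC =====
def Spec_get_new_position (instructions : List (Int × Int)) (position : Int) (out : Int) : Prop := out = get_new_position_alt instructions position
instance (instructions : List (Int × Int)) (position : Int) (out : Int) : Decidable (Spec_get_new_position instructions position out) := by unfold Spec_get_new_position; infer_instance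

-- ===== CLAIM (what is proved, stated in full; the proofs are below) =====
def Claim_equal_get_new_position : Prop := ∀ (instructions : List (Int × Int)) (position : Int), Dom_get_new_position instructions position → Spec_get_new_position instructions position (get_new_position instructions position)

-- ===== LEMMAS AND PROOFS =====

-- ===== VERDICT (by name: the statement is the Claim_ definition above) =====
-- Loop invariant: running A's loop from a*p+b equals applying B's composed coefficients to p.
theorem affine_invariant (instructions : List (Int × Int)) (p a b : Int) :
    get_new_position instructions (a * p + b)
      = (instructions.foldl
          (fun ab iv =>
            if iv.1 == 0 then (-ab.1, -ab.2 - 1)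
            else if iv.1 == 1 then (ab.1, ab.2 - iv.2)
            else if iv.1 == 2 then (ab.1 * iv.2, ab.2 * iv.2)
            else ab)
          (a, b)).1 * p
        + (instructions.foldl
          (fun ab iv =>
            if iv.1 == 0 then (-ab.1, -ab.2 - 1)
            else if iv.1 == 1 then (ab.1, ab.2 - iv.2)
            else if iv.1 == 2 then (ab.1 * iv.2, ab.2 * iv.2)
            else ab)
          (a, b)).2 := by
  induction instructions generalizing a b with
  | nil => simp [get_new_position]
  | cons hd tl ih =>
    simp only [get_new_position, List.foldl_cons] at ih ⊢
    by_cases h0 : hd.1 = 0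
    · have := ih (-a) (-b - 1)
      simp only [h0] at this ⊢
      simp at this ⊢
      convert this using 2
      ring
    · by_cases h1 : hd.1 = 1
      · have := ih a (b - hd.2)
        simp only [h1] at this ⊢
        simp at this ⊢
        convert this using 2
        ring
      · by_cases h2 : hd.1 = 2
        · have := ih (a * hd.2) (b * hd.2)
          simp only [h2] at this ⊢
          simp at this ⊢
          convert this using 2
          ring
        · have := ih a b
          simp only [beq_iff_eq, h0, h1, h2, if_false] at this ⊢
          exact this

theorem get_new_position_spec : Claim_equal_get_new_position := by
  intro instructions position _
  unfold Spec_get_new_position get_new_position_alt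
  have h := affine_invariant instructions position 1 0
  simpa using h
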